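-- pv_equiv track=rewrite | github.com/Zavtrax007/PyAlgoVk | sem_5/task_4.py | maxMinMulti
-- ===== SOURCE A (Python) =====
-- def maxMinMulti(data):
--     if type(data) is not list:
--         raise TypeError('Array must be list')
--     if len(data) < 1:
--         return None
--     if len(data) == 1:
--         return data[0]*data[0]
--     min_index = 1
--     max_index = 2
--     i = 0
--     while i < len(data):
--         min_index = i
--         i = 2 * i + 1
--     i = 0
--     while i < len(data):
--         max_index = i
--         i = 2 * i + 2
--     return data[min_index] * data[max_index]
-- ===== SOURCE B (Python) =====
-- def maxMinMulti(data):
--     if type(data) is not list: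
--         raise TypeError('Array must be list')
--     n = len(data)
--     if n < 1:
--         return None
--     if n == 1:
--         return data[0] * data[0]
--     min_index = (1 << (n.bit_length() - 1)) - 1
--     max_index = (1 << ((n + 1).bit_length() - 1)) - 2
--     return data[min_index] * data[max_index]
-- ===== Notes on version B (the rewrite author's own statement) =====
-- stated objective: simpler
-- what changed: Replaces A's two doubling while-loops with closed-form indices computed from bit lengths: min_index = (1 << (n.bit_length()-1)) - 1 and max_index = (1 << ((n+1).bit_length()-1)) - 2.
import Mathlib
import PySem

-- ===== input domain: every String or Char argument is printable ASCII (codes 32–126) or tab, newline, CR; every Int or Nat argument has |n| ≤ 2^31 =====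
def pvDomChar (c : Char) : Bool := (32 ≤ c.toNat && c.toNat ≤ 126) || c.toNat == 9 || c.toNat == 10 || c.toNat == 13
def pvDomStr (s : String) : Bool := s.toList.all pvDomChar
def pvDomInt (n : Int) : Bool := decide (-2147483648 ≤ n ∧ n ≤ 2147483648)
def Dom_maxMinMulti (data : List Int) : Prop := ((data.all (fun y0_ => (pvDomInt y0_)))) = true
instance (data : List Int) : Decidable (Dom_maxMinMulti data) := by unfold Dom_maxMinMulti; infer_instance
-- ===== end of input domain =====

-- B replaces A's two doubling while-loops by closed-form indices computed from bit lengths (objective: simpler).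

-- ===== PORT A =====
-- while i < len(data): min_index = i; i = 2*i+1   (i starts at 0, so it stays a Nat)
def minLoop (n : Nat) (i : Nat) (acc : Nat) : Nat :=
  if i < n then minLoop n (2 * i + 1) i else acc
termination_by n - i
decreasing_by omega

-- while i < len(data): max_index = i; i = 2*i+2
def maxLoop (n : Nat) (i : Nat) (acc : Nat) : Nat :=
  if i < n then maxLoop n (2 * i + 2) i else acc
termination_by n - i
decreasing_by omega

def maxMinMulti (data : List Int) : Option Int :=
  if data.length < 1 then none
  else if data.length = 1 then
    match PySem.List.pyGet? data 0 with
    | some x => some (x * x)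
    | none => none
  else
    let minIdx := minLoop data.length 0 1   -- min_index starts at 1
    let maxIdx := maxLoop data.length 0 2   -- max_index starts at 2
    match PySem.List.pyGet? data (minIdx : Int), PySem.List.pyGet? data (maxIdx : Int) with
    | some a, some b => some (a * b)
    | _, _ => none

-- ===== PORT B =====
-- Python's n.bit_length(): 0 for n = 0, otherwise Nat.log 2 n + 1
def pyBitLength (n : Nat) : Nat := if n = 0 then 0 else Nat.log 2 n + 1

def maxMinMulti_alt (data : List Int) : Option Int :=
  if data.length < 1 then none
  else if data.length = 1 then
    (PySem.List.pyGet? data 0).map (fun x => x * x)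
  else
    let n := data.length
    let minIdx : Nat := 2 ^ (pyBitLength n - 1) - 1         -- (1 << (n.bit_length()-1)) - 1
    let maxIdx : Nat := 2 ^ (pyBitLength (n + 1) - 1) - 2   -- (1 << ((n+1).bit_length()-1)) - 2
    (PySem.List.pyGet? data (minIdx : Int)).bind (fun a =>
      (PySem.List.pyGet? data (maxIdx : Int)).map (fun b => a * b))

-- ===== PRECONDITION & SPEC =====
def Spec_maxMinMulti (data : List Int) (out : Option Int) : Prop := out = maxMinMulti_alt data
instance (data : List Int) (out : Option Int) : Decidable (Spec_maxMinMulti data out) := by unfold Spec_maxMinMulti; infer_instance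

-- ===== CLAIM (what is proved, stated in full; the proofs are below) =====
def Claim_equal_maxMinMulti : Prop := ∀ (data : List Int), Dom_maxMinMulti data → Spec_maxMinMulti data (maxMinMulti data)

-- ===== LEMMAS AND PROOFS =====

lemma minLoop_closed (n k acc : Nat) (h : 2 ^ k - 1 < n) :
    minLoop n (2 ^ k - 1) acc = 2 ^ (Nat.log 2 n) - 1 := by
  have hk1 : 1 ≤ 2 ^ k := Nat.one_le_two_pow
  have e : 2 * (2 ^ k - 1) + 1 = 2 ^ (k + 1) - 1 := by
    have : 2 ^ (k + 1) = 2 ^ k * 2 := pow_succ 2 k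
    omega
  rw [minLoop, if_pos h, e]
  by_cases h2 : 2 ^ (k + 1) - 1 < n
  · exact minLoop_closed n (k + 1) _ h2
  · rw [minLoop, if_neg h2]
    have hlog : Nat.log 2 n = k :=
      Nat.log_eq_of_pow_le_of_lt_pow (by omega) (by omega)
    rw [hlog]
termination_by n - 2 ^ k
decreasing_by
  have : 2 ^ (k + 1) = 2 ^ k * 2 := pow_succ 2 k
  have hk1 : 1 ≤ 2 ^ k := Nat.one_le_two_pow
  omega

lemma maxLoop_closed (n k acc : Nat) (h : 2 ^ (k + 1) - 2 < n) :
    maxLoop n (2 ^ (k + 1) - 2) acc = 2 ^ (Nat.log 2 (n + 1)) - 2 := by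
  have hk1 : 2 ≤ 2 ^ (k + 1) := by
    have : 2 ^ 1 ≤ 2 ^ (k + 1) := Nat.pow_le_pow_right (by norm_num) (by omega)
    simpa using this
  have e : 2 * (2 ^ (k + 1) - 2) + 2 = 2 ^ (k + 2) - 2 := by
    have : 2 ^ (k + 2) = 2 ^ (k + 1) * 2 := pow_succ 2 (k + 1)
    omega
  rw [maxLoop, if_pos h, e]
  by_cases h2 : 2 ^ (k + 2) - 2 < n
  · exact maxLoop_closed n (k + 1) _ h2
  · rw [maxLoop, if_neg h2]
    have hlog : Nat.log 2 (n + 1) = k + 1 :=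
      Nat.log_eq_of_pow_le_of_lt_pow (by omega) (by omega)
    rw [hlog]
termination_by n - 2 ^ (k + 1)
decreasing_by
  have : 2 ^ (k + 2) = 2 ^ (k + 1) * 2 := pow_succ 2 (k + 1)
  have hk1 : 2 ≤ 2 ^ (k + 1) := by
    have : 2 ^ 1 ≤ 2 ^ (k + 1) := Nat.pow_le_pow_right (by norm_num) (by omega)
    simpa using this
  omega

-- ===== VERDICT (by name: the statement is the Claim_ definition above) =====
theorem maxMinMulti_spec : Claim_equal_maxMinMulti := by
  unfold Claim_equal_maxMinMulti Spec_maxMinMulti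
  intro data _
  unfold maxMinMulti maxMinMulti_alt
  by_cases h1 : data.length < 1
  · simp [h1]
  · by_cases h2 : data.length = 1
    · rw [if_neg h1, if_neg h1, if_pos h2, if_pos h2]
      cases PySem.List.pyGet? data 0 <;> rfl
    · have hn : 2 ≤ data.length := by omega
      have hmin : minLoop data.length 0 1 = 2 ^ (pyBitLength data.length - 1) - 1 := by
        have h0 : (0 : Nat) = 2 ^ 0 - 1 := by norm_num
        rw [h0, minLoop_closed data.length 0 1 (by simp; omega)]
        rw [pyBitLength, if_neg (by omega : ¬ data.length = 0)]
        simp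
      have hmax : maxLoop data.length 0 2 = 2 ^ (pyBitLength (data.length + 1) - 1) - 2 := by
        have h0 : (0 : Nat) = 2 ^ (0 + 1) - 2 := by norm_num
        rw [h0, maxLoop_closed data.length 0 2 (by simp; omega)]
        rw [pyBitLength, if_neg (by omega : ¬ data.length + 1 = 0)]
        simp
      simp only [if_neg h1, if_neg h2, hmin, hmax]
      cases PySem.List.pyGet? data (((2 ^ (pyBitLength data.length - 1) - 1 : Nat) : Int)) <;>
        cases PySem.List.pyGet? data (((2 ^ (pyBitLength (data.length + 1) - 1) - 2 : Nat) : Int)) <;>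
        rfl
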